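-- pv_equiv track=rewrite | github.com/sooy0817/System-Architecture-Diagram | scripts/make_dataset.py | label_of
-- ===== SOURCE A (Python) =====
-- from typing import Dict, List, Optional, Tuple
--
-- def label_of(entities: Dict[str, List[str]], name: str) -> Optional[str]:
--     priority = [
--         "Server",
--         "DBMS",
--         "ExternalSystem",
--         "Interface",
--         "NetworkDevice",
--         "GSLB",
--         "Line",
--         "Firewall",
--         "SystemGroup",
--         "ServerGroup",
--         "NetworkZone",
--         "Center",
--         "Corporation",
--         "Diagram",
--     ]
--     for lab in priority:
--         if name in entities.get(lab, []):
--             return lab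
--     for lab, names in entities.items():
--         if name in names:
--             return lab
--     return None
-- ===== SOURCE B (Python) =====
-- from typing import Dict, List, Optional
--
-- def label_of(entities: Dict[str, List[str]], name: str) -> Optional[str]:
--     priority = [
--         "Server",
--         "DBMS",
--         "ExternalSystem",
--         "Interface",
--         "NetworkDevice",
--         "GSLB",
--         "Line",
--         "Firewall",
--         "SystemGroup",
--         "ServerGroup",
--         "NetworkZone",
--         "Center",
--         "Corporation",
--         "Diagram",
--     ]
--     rank = {lab: r for r, lab in enumerate(priority)}
--     np = len(priority)
--     n = len(entities)
--     # every label whose list contains name, scored by (priority rank, insertion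
--     # position) folded into one integer; the best (lowest) score wins
--     hits = [(rank.get(lab, np) * n + i, lab)
--             for i, (lab, names) in enumerate(entities.items())
--             if name in names]
--     best = min(hits, key=lambda h: h[0], default=None)
--     return None if best is None else best[1]
-- ===== Notes on version B (the rewrite author's own statement) =====
-- stated objective: alternative
-- what changed: B replaces A's two sequential first-match scans (priority pass, then dict pass) by a filter-then-argmin: it collects every label whose list contains name together with a numeric score (priority rank, or len(priority) for non-priority labels, combined with the insertion index) and returns the label with the minimal score via min(..., key=...).
import Mathlib
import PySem

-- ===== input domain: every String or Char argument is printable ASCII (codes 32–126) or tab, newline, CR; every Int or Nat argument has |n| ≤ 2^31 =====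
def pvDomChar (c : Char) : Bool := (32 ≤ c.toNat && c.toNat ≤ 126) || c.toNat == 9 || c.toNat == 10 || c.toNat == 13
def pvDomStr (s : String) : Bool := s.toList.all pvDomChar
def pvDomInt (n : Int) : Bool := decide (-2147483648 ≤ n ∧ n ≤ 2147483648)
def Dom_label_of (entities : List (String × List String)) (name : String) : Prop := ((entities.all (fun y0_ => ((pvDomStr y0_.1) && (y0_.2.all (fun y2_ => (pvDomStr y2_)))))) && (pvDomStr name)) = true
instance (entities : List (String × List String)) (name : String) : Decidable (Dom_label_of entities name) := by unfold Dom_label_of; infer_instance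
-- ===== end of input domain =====

-- B is a different algorithm: instead of A's two sequential first-match scans it collects every
-- matching label with a numeric score (priority rank, insertion index) and returns the argmin.

-- the shared literal priority list of the Python source
def pvPriority : List String :=
  ["Server", "DBMS", "ExternalSystem", "Interface", "NetworkDevice", "GSLB", "Line",
   "Firewall", "SystemGroup", "ServerGroup", "NetworkZone", "Center", "Corporation", "Diagram"]

-- ===== PORT A =====
-- first loop: first priority label whose entities.get(lab, []) contains name;
-- second loop: first (lab, names) item with name in names.
def label_of (entities : List (String × List String)) (name : String) : Option String :=
  match pvPriority.find? (fun lab => ((PySem.Dict.mk entities).getD lab []).contains name) with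
  | some lab => some lab
  | none =>
    match entities.find? (fun p => p.2.contains name) with
    | some p => some p.1
    | none => none

-- ===== PORT B =====
-- rank = {lab: r for r, lab in enumerate(priority)}; hits = [(score, lab) for matching items];
-- best = min(hits, key=score, default=None)
def label_of_alt (entities : List (String × List String)) (name : String) : Option String :=
  let rank : PySem.Dict String Int :=
    PySem.Dict.mk ((PySem.List.enumerate pvPriority).map (fun p => (p.2, p.1)))
  let np : Int := PySem.List.len pvPriority
  let n : Int := PySem.List.len entities
  let hits : List (Int × String) :=
    (PySem.List.enumerate entities).filterMap (fun p =>
      if p.2.2.contains name then some (rank.getD p.2.1 np * n + p.1, p.2.1) else none)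
  match PySem.List.min? hits (fun h => h.1) with
  | some best => some best.2
  | none => none

-- ===== PRECONDITION & SPEC =====
-- Pre_ excludes association lists with duplicate keys: those do not represent any Python dict
-- (the parameter is a dict), so neither program can ever receive them.
-- (stated over .toList so that 'decide' evaluates it; distinct strings = distinct char lists)
def Pre_label_of (entities : List (String × List String)) (name : String) : Prop :=
  (entities.map (fun p => p.1.toList)).Nodup

instance (entities : List (String × List String)) (name : String) : Decidable (Pre_label_of entities name) := by unfold Pre_label_of; infer_instance

def pvWitness_label_of : (List (String × List String)) × String := ([("Server", ["a"]), ("Foo", ["b"])], "b")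

def Spec_label_of (entities : List (String × List String)) (name : String) (out : Option String) : Prop := out = label_of_alt entities name
instance (entities : List (String × List String)) (name : String) (out : Option String) : Decidable (Spec_label_of entities name out) := by unfold Spec_label_of; infer_instance

-- ===== CLAIM (what is proved, stated in full; the proofs are below) =====
def Claim_equal_label_of : Prop := ∀ (entities : List (String × List String)) (name : String), Dom_label_of entities name → Pre_label_of entities name → Spec_label_of entities name (label_of entities name)

-- ===== LEMMAS AND PROOFS =====

-- proof-only names for B's intermediate values
def pvRankD : PySem.Dict String Int :=
  PySem.Dict.mk ((PySem.List.enumerate pvPriority).map (fun p => (p.2, p.1)))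

def pvKeyOf (entities : List (String × List String)) (lab : String) (k : Nat) : Int :=
  pvRankD.getD lab (PySem.List.len pvPriority) * PySem.List.len entities + (k : Int)

def pvHits (entities : List (String × List String)) (name : String) : List (Int × String) :=
  (PySem.List.enumerate entities).filterMap (fun p =>
    if p.2.2.contains name then
      some (pvRankD.getD p.2.1 (PySem.List.len pvPriority) * PySem.List.len entities + p.1, p.2.1)
    else none)

def pvP (entities : List (String × List String)) (name : String) : String → Bool :=
  fun lab => ((PySem.Dict.mk entities).getD lab []).contains name

theorem pvAlt_eq (entities : List (String × List String)) (name : String) :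
    label_of_alt entities name =
      match PySem.List.min? (pvHits entities name) (fun h => h.1) with
      | some best => some best.2
      | none => none := rfl

-- min? returns the element that is uniquely minimal under key
theorem pvMin?_unique {α : Type} (xs : List α) (key : α → Int) (x : α) (hx : x ∈ xs)
    (hmin : ∀ y ∈ xs, key x ≤ key y) (huni : ∀ y ∈ xs, key y = key x → y = x) :
    PySem.List.min? xs key = some x := by
  cases hm : PySem.List.min? xs key with
  | none =>
    rw [PySem.List.min?_eq_none_iff] at hm
    subst hm; cases hx
  | some m =>
    have h1 := PySem.List.min?_isMin hm x hx
    have h2 := hmin m (PySem.List.min?_mem hm)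
    rw [huni m (PySem.List.min?_mem hm) (le_antisymm h1 h2)]

-- the rank dict built from enumerate maps a label to its index in the list
theorem pvRankGet (l : List String) (s : Int) (lab : String) :
    (PySem.Dict.mk ((PySem.List.enumerate l s).map (fun p => (p.2, p.1)))).get? lab
      = if lab ∈ l then some (s + (l.idxOf lab : Int)) else none := by
  induction l generalizing s with
  | nil =>
    rw [if_neg (List.not_mem_nil)]
    rfl
  | cons x t ih =>
    rw [PySem.List.enumerate_cons, List.map_cons]
    rw [show ((s, x).2, (s, x).1) = (x, s) from rfl]
    rw [PySem.Dict.get?_mk_cons]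
    by_cases hx : x = lab
    · subst hx
      rw [if_pos (by simp), if_pos (List.mem_cons_self ..)]
      simp [List.idxOf_cons_self]
    · rw [if_neg (by simpa using hx), ih (s + 1)]
      by_cases hm : lab ∈ t
      · rw [if_pos hm, if_pos (List.mem_cons_of_mem x hm)]
        rw [List.idxOf_cons_ne _ hx]
        congr 1
        push_cast
        ring
      · rw [if_neg hm, if_neg ?_]
        intro hmem
        rcases List.mem_cons.mp hmem with h | h
        · exact hx h.symm
        · exact hm h

theorem pvRankD_getD (lab : String) :
    pvRankD.getD lab (PySem.List.len pvPriority)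
      = if lab ∈ pvPriority then (pvPriority.idxOf lab : Int) else 14 := by
  rw [PySem.Dict.getD_eq_get?_getD,
    show pvRankD.get? lab = if lab ∈ pvPriority then some ((0 : Int) + (pvPriority.idxOf lab : Int)) else none from pvRankGet pvPriority 0 lab]
  by_cases hm : lab ∈ pvPriority
  · rw [if_pos hm, if_pos hm]
    simp
  · rw [if_neg hm, if_neg hm]
    rfl

-- with nodup keys, the dict lookup of a present key is its value
theorem pvGet?_of_mem_nodup (entities : List (String × List String)) (lab : String)
    (v : List String) (hnd : (entities.map Prod.fst).Nodup) (hmem : (lab, v) ∈ entities) :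
    (PySem.Dict.mk entities).get? lab = some v := by
  induction entities with
  | nil => cases hmem
  | cons e t ih =>
    obtain ⟨k, w⟩ := e
    rw [PySem.Dict.get?_mk_cons]
    rcases List.mem_cons.mp hmem with h | h
    · rw [Prod.mk.injEq] at h
      obtain ⟨rfl, rfl⟩ := h
      rw [if_pos (by simp)]
    · have hk : k ∉ t.map Prod.fst := (List.nodup_cons.mp (by simpa using hnd)).1
      have hne : k ≠ lab := fun he => hk (he ▸ List.mem_map_of_mem h)
      rw [if_neg (by simpa using hne)]
      exact ih (List.nodup_cons.mp (by simpa using hnd)).2 h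

theorem pvGet?_some_mem (entities : List (String × List String)) (lab : String)
    (v : List String) (h : (PySem.Dict.mk entities).get? lab = some v) : (lab, v) ∈ entities := by
  induction entities with
  | nil =>
    exact absurd h (by rw [show (PySem.Dict.mk ([] : List (String × List String))).get? lab = none from rfl]; simp)
  | cons e t ih =>
    obtain ⟨k, w⟩ := e
    rw [PySem.Dict.get?_mk_cons] at h
    by_cases hk : k = lab
    · subst hk
      rw [if_pos (by simp)] at h
      obtain rfl : w = v := by injection h
      exact List.mem_cons_self ..
    · rw [if_neg (by simpa using hk)] at h
      exact List.mem_cons_of_mem _ (ih h)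

-- membership in B's hit list
theorem pvMem_hits (entities : List (String × List String)) (name : String)
    (h : Int × String) :
    h ∈ pvHits entities name ↔
      ∃ (k : Nat) (hk : k < entities.length),
        entities[k].2.contains name = true ∧ h = (pvKeyOf entities entities[k].1 k, entities[k].1) := by
  unfold pvHits pvKeyOf
  rw [List.mem_filterMap]
  constructor
  · rintro ⟨p, hp, hf⟩
    obtain ⟨k, hk, rfl⟩ := (PySem.List.mem_enumerate_iff _ _ _).mp hp
    dsimp only at hf
    by_cases hc : entities[k].2.contains name
    · rw [if_pos hc] at hf
      refine ⟨k, hk, hc, ?_⟩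
      rw [← Option.some_inj.mp hf]
      simp
    · rw [if_neg hc] at hf
      cases hf
  · rintro ⟨k, hk, hc, rfl⟩
    refine ⟨((0 : Int) + (k : Int), entities[k]), (PySem.List.mem_enumerate_iff _ _ _).mpr ⟨k, hk, rfl⟩, ?_⟩
    dsimp only
    rw [if_pos hc]
    simp

-- pvP lab = true gives the value behind lab
theorem pvP_true (entities : List (String × List String)) (name lab : String)
    (h : pvP entities name lab = true) :
    ∃ v, (PySem.Dict.mk entities).get? lab = some v ∧ v.contains name = true := by
  unfold pvP at h
  rw [PySem.Dict.getD_eq_get?_getD] at h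
  cases hg : (PySem.Dict.mk entities).get? lab with
  | none => rw [hg] at h; simp at h
  | some v => exact ⟨v, rfl, by rwa [hg] at h⟩

-- first-match minimality of find?
theorem pvFind?_min {α : Type} [BEq α] [LawfulBEq α] (p : α → Bool) (l : List α) (a : α)
    (h : l.find? p = some a) : ∀ b ∈ l, p b = true → l.idxOf a ≤ l.idxOf b := by
  induction l with
  | nil => cases h
  | cons x t ih =>
    intro b hb hpb
    by_cases hx : p x
    · rw [List.find?_cons_of_pos hx] at h
      obtain rfl : x = a := by injection h
      simp [List.idxOf_cons_self]
    · rw [List.find?_cons_of_neg hx] at h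
      have hpa : p a = true := List.find?_some h
      have hax : a ≠ x := fun he => by rw [he] at hpa; exact hx hpa
      have hbx : b ≠ x := fun he => by rw [he] at hpb; exact hx hpb
      rcases List.mem_cons.mp hb with rfl | hbt
      · exact absurd rfl hbx
      · rw [List.idxOf_cons_ne _ (Ne.symm hax), List.idxOf_cons_ne _ (Ne.symm hbx)]
        exact Nat.succ_le_succ (ih h b hbt hpb)

-- score comparison: a strictly smaller rank beats any index
theorem pvKeyLt {ra rb : Int} {k j n : Nat} (h : ra < rb) (hk : k < n) (_hra : 0 ≤ ra) :
    ra * (n : Int) + (k : Int) < rb * (n : Int) + (j : Int) := by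
  have h1 : (ra + 1) * (n : Int) ≤ rb * (n : Int) :=
    mul_le_mul_of_nonneg_right (by omega) (by positivity)
  have h2 : (k : Int) < (n : Int) := by exact_mod_cast hk
  nlinarith [Int.natCast_nonneg j]

-- nodup keys make the entity index of a label unique
theorem pvIdx_unique (entities : List (String × List String))
    (hnd : (entities.map Prod.fst).Nodup) (k j : Nat) (hk : k < entities.length)
    (hj : j < entities.length) (he : entities[k].1 = entities[j].1) : k = j := by
  have hk' : k < (entities.map Prod.fst).length := by simpa using hk
  have hj' : j < (entities.map Prod.fst).length := by simpa using hj
  have hmap : (entities.map Prod.fst)[k]'hk' = (entities.map Prod.fst)[j]'hj' := by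
    simpa using he
  exact (List.Nodup.getElem_inj_iff hnd).mp hmap

-- ===== VERDICT (by name: the statement is the Claim_ definition above) =====
theorem label_of_spec : Claim_equal_label_of := by
  intro entities name _ hpretl
  have hpre : (entities.map Prod.fst).Nodup := by
    have h2 : ((entities.map Prod.fst).map String.toList).Nodup := by
      simpa [List.map_map] using hpretl
    exact h2.of_map
  show label_of entities name = label_of_alt entities name
  rw [pvAlt_eq]
  unfold label_of
  rw [show (fun lab => ((PySem.Dict.mk entities).getD lab []).contains name) = pvP entities name from rfl]
  cases hfp : pvPriority.find? (pvP entities name) with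
  | some lab =>
    have hPlab : pvP entities name lab = true := List.find?_some hfp
    have hlabmem : lab ∈ pvPriority := List.mem_of_find?_eq_some hfp
    obtain ⟨v, hget, hv⟩ := pvP_true entities name lab hPlab
    obtain ⟨k, hk, hEk⟩ := List.getElem_of_mem (pvGet?_some_mem entities lab v hget)
    have hEk1 : entities[k].1 = lab := by rw [hEk]
    have hEk2 : entities[k].2 = v := by rw [hEk]
    have hxmem : (pvKeyOf entities lab k, lab) ∈ pvHits entities name := by
      rw [pvMem_hits]
      exact ⟨k, hk, by rw [hEk2]; exact hv, by rw [hEk1]⟩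
    have hlen14 : pvPriority.length = 14 := rfl
    have hkey : ∀ (j : Nat) (hj : j < entities.length), entities[j].2.contains name = true →
        pvKeyOf entities lab k ≤ pvKeyOf entities entities[j].1 j ∧
        (pvKeyOf entities entities[j].1 j = pvKeyOf entities lab k →
          ((pvKeyOf entities entities[j].1 j, entities[j].1) : Int × String)
            = (pvKeyOf entities lab k, lab)) := by
      intro j hj hcj
      by_cases hjp : entities[j].1 ∈ pvPriority
      · have hPj : pvP entities name entities[j].1 = true := by
          unfold pvP
          rw [PySem.Dict.getD_eq_get?_getD,
            pvGet?_of_mem_nodup entities entities[j].1 entities[j].2 hpre (List.getElem_mem hj)]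
          simpa using hcj
        have hle : pvPriority.idxOf lab ≤ pvPriority.idxOf entities[j].1 :=
          pvFind?_min _ _ _ hfp _ hjp hPj
        rcases Nat.lt_or_ge (pvPriority.idxOf lab) (pvPriority.idxOf entities[j].1) with hlt | hge
        · have hklt : pvKeyOf entities lab k < pvKeyOf entities entities[j].1 j := by
            unfold pvKeyOf
            rw [pvRankD_getD, pvRankD_getD, if_pos hlabmem, if_pos hjp]
            simp only [PySem.List.len_eq]
            exact pvKeyLt (by exact_mod_cast hlt) hk (Int.natCast_nonneg _)
          exact ⟨le_of_lt hklt, fun h => absurd h (by omega)⟩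
        · have hlabeq : entities[j].1 = lab := by
            have h1 : pvPriority[pvPriority.idxOf entities[j].1]'(List.idxOf_lt_length_of_mem hjp)
                = entities[j].1 := List.getElem_idxOf _
            have h2 : pvPriority[pvPriority.idxOf lab]'(List.idxOf_lt_length_of_mem hlabmem)
                = lab := List.getElem_idxOf _
            rw [← h1, ← h2]
            congr 1
            omega
          have hjk : j = k := pvIdx_unique entities hpre j k hj hk (by rw [hlabeq, hEk1])
          subst hjk
          rw [hlabeq]
          exact ⟨le_refl _, fun _ => rfl⟩
      · have hklt : pvKeyOf entities lab k < pvKeyOf entities entities[j].1 j := by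
          unfold pvKeyOf
          rw [pvRankD_getD, pvRankD_getD, if_pos hlabmem, if_neg hjp]
          simp only [PySem.List.len_eq]
          have h14 : pvPriority.idxOf lab < 14 := hlen14 ▸ List.idxOf_lt_length_of_mem hlabmem
          exact pvKeyLt (by exact_mod_cast h14) hk (Int.natCast_nonneg _)
        exact ⟨le_of_lt hklt, fun h => absurd h (by omega)⟩
    have hmineq : PySem.List.min? (pvHits entities name) (fun h => h.1)
        = some (pvKeyOf entities lab k, lab) := by
      apply pvMin?_unique _ _ _ hxmem
      · intro y hy
        obtain ⟨j, hj, hcj, rfl⟩ := (pvMem_hits entities name y).mp hy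
        exact (hkey j hj hcj).1
      · intro y hy he
        obtain ⟨j, hj, hcj, rfl⟩ := (pvMem_hits entities name y).mp hy
        exact (hkey j hj hcj).2 he
    rw [hmineq]
  | none =>
    have hnone : ∀ lab ∈ pvPriority, pvP entities name lab = false := by
      intro lab hl
      simpa using List.find?_eq_none.mp hfp lab hl
    have hnp : ∀ (j : Nat) (hj : j < entities.length), entities[j].2.contains name = true →
        entities[j].1 ∉ pvPriority := by
      intro j hj hcj hmem
      have hPj : pvP entities name entities[j].1 = true := by
        unfold pvP
        rw [PySem.Dict.getD_eq_get?_getD,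
          pvGet?_of_mem_nodup entities entities[j].1 entities[j].2 hpre (List.getElem_mem hj)]
        simpa using hcj
      rw [hnone _ hmem] at hPj
      cases hPj
    cases hfe : entities.find? (fun p => p.2.contains name) with
    | none =>
      have hnil : pvHits entities name = [] := by
        rw [List.eq_nil_iff_forall_not_mem]
        intro h hh
        obtain ⟨j, hj, hcj, rfl⟩ := (pvMem_hits entities name h).mp hh
        have := List.find?_eq_none.mp hfe entities[j] (List.getElem_mem hj)
        simp at this
        exact this (by simpa using hcj)
      rw [hnil]
      rfl
    | some p =>
      obtain ⟨hp, pre, post, hsplit, hpre'⟩ := List.find?_eq_some_iff_append.mp hfe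
      subst hsplit
      have hcp : p.2.contains name = true := by simpa using hp
      have hj0 : pre.length < (pre ++ p :: post).length := by simp
      have hEj : (pre ++ p :: post)[pre.length]'hj0 = p := by
        rw [List.getElem_append_right (le_refl pre.length)]
        simp
      have hxmem : (pvKeyOf (pre ++ p :: post) p.1 pre.length, p.1)
          ∈ pvHits (pre ++ p :: post) name := by
        rw [pvMem_hits]
        refine ⟨pre.length, hj0, ?_, ?_⟩
        · rw [hEj]; exact hcp
        · rw [hEj]
      have hnpp : p.1 ∉ pvPriority := by
        have := hnp pre.length hj0 (by rw [hEj]; exact hcp)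
        rwa [hEj] at this
      have hkey : ∀ (j : Nat) (hj : j < (pre ++ p :: post).length),
          (pre ++ p :: post)[j].2.contains name = true →
          pvKeyOf (pre ++ p :: post) p.1 pre.length ≤ pvKeyOf (pre ++ p :: post) (pre ++ p :: post)[j].1 j ∧
          (pvKeyOf (pre ++ p :: post) (pre ++ p :: post)[j].1 j = pvKeyOf (pre ++ p :: post) p.1 pre.length →
            ((pvKeyOf (pre ++ p :: post) (pre ++ p :: post)[j].1 j, (pre ++ p :: post)[j].1) : Int × String)
              = (pvKeyOf (pre ++ p :: post) p.1 pre.length, p.1)) := by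
        intro j hj hcj
        have hnpj : (pre ++ p :: post)[j].1 ∉ pvPriority := hnp j hj hcj
        have hjge : pre.length ≤ j := by
          by_contra hlt
          push Not at hlt
          have hmemj : (pre ++ p :: post)[j] ∈ pre := by
            have hgl : (pre ++ p :: post)[j]'hj = pre[j]'hlt := List.getElem_append_left hlt
            rw [hgl]
            exact List.getElem_mem hlt
          have := hpre' _ hmemj
          simp at this
          exact this (by simpa using hcj)
        unfold pvKeyOf
        rw [pvRankD_getD, pvRankD_getD, if_neg hnpp, if_neg hnpj]
        simp only [PySem.List.len_eq]
        have hji : (pre.length : Int) ≤ (j : Int) := by exact_mod_cast hjge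
        constructor
        · omega
        · intro he
          have hjeq : j = pre.length := by omega
          subst hjeq
          rw [hEj]
      have hmineq : PySem.List.min? (pvHits (pre ++ p :: post) name) (fun h => h.1)
          = some (pvKeyOf (pre ++ p :: post) p.1 pre.length, p.1) := by
        apply pvMin?_unique _ _ _ hxmem
        · intro y hy
          obtain ⟨j, hj, hcj, rfl⟩ := (pvMem_hits (pre ++ p :: post) name y).mp hy
          exact (hkey j hj hcj).1
        · intro y hy he
          obtain ⟨j, hj, hcj, rfl⟩ := (pvMem_hits (pre ++ p :: post) name y).mp hy
          exact (hkey j hj hcj).2 he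
      rw [hmineq]
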